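-- pv_equiv track=rewrite | github.com/BeediGoua/InsightDetector | insight-detector/src/validation/summary_validator.py | _assess_correctability
-- ===== SOURCE A (Python) =====
-- from typing import Dict, List, Tuple, Optional, Any
--
-- def _assess_correctability(issues: List[Dict]) -> bool:
--     """Évalue si un résumé peut être corrigé automatiquement."""
--
--     critical_issues = [issue for issue in issues if issue['severity'] == 'critical']
--
--     # Résumé récupérable si:
--     # - Pas d'hallucination complète OU
--     # - Seulement problèmes techniques (répétitions, encodage, longueur)
--
--     has_hallucination = any(issue['type'] == 'topic_hallucination' for issue in critical_issues)
--     has_only_technical_issues = all(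
--         issue['type'] in ['excessive_repetition', 'excessive_length', 'encoding_corruption']
--         for issue in critical_issues
--     )
--
--     return not has_hallucination or has_only_technical_issues
-- ===== SOURCE B (Python) =====
-- from typing import Dict, List
--
-- def _assess_correctability(issues: List[Dict]) -> bool:
--     """A critical 'topic_hallucination' is itself non-technical, so A's all(...)
--     clause is redundant whenever its any(...) fires: the summary is correctable
--     iff no critical issue is a topic hallucination. Early-exit search."""
--     for issue in issues:
--         if issue['severity'] == 'critical' and issue['type'] == 'topic_hallucination':
--             return False
--     return True
-- ===== Notes on version B (the rewrite author's own statement) =====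
-- stated objective: simpler
-- what changed: Uses the logical fact that a critical topic_hallucination is itself non-technical (so A's all(...) clause is redundant whenever any(...) fires) to replace the filter+any+all three-phase computation by a single early-exit search for a critical topic_hallucination.
import Mathlib
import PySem

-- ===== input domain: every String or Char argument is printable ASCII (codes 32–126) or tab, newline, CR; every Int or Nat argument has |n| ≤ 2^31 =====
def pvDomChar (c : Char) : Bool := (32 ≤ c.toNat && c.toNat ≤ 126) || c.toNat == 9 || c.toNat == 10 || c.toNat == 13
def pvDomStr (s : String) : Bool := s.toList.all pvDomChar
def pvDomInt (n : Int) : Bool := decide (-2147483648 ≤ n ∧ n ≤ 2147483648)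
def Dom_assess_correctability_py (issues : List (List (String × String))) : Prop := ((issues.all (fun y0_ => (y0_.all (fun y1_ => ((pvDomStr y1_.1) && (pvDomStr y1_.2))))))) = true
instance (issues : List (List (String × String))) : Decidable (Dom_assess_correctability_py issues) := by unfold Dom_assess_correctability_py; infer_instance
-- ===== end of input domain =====

-- B drops A's redundant all(...) clause (a critical topic_hallucination is itself
-- non-technical) and is a single early-exit search instead of filter+any+all.

-- ===== PORT A =====
-- Port of A. Python raises KeyError on a missing 'severity'/'type' key; Pre_ excludes
-- those inputs, so the "" default of getD is never the value actually used under Pre_.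
def assess_correctability_py (issues : List (List (String × String))) : Bool :=
  let critical_issues := issues.filter
    (fun issue => PySem.Dict.getD (PySem.Dict.mk issue) "severity" "" == "critical")
  let has_hallucination := critical_issues.any
    (fun issue => PySem.Dict.getD (PySem.Dict.mk issue) "type" "" == "topic_hallucination")
  let has_only_technical_issues := critical_issues.all
    (fun issue => ["excessive_repetition", "excessive_length", "encoding_corruption"].contains
      (PySem.Dict.getD (PySem.Dict.mk issue) "type" ""))
  !has_hallucination || has_only_technical_issues

-- ===== PORT B =====
-- Source B's early-exit for-loop as structural recursion: return false at the first
-- critical topic_hallucination, true if the scan finishes.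
def assess_correctability_py_alt (issues : List (List (String × String))) : Bool :=
  match issues with
  | [] => true
  | issue :: rest =>
    if PySem.Dict.getD (PySem.Dict.mk issue) "severity" "" == "critical" &&
       PySem.Dict.getD (PySem.Dict.mk issue) "type" "" == "topic_hallucination" then
      false
    else
      assess_correctability_py_alt rest

-- ===== PRECONDITION & SPEC =====
-- Pre_ excludes exactly the inputs where Python A raises KeyError: an issue without a
-- 'severity' key, or a critical issue without a 'type' key.
def Pre_assess_correctability_py (issues : List (List (String × String))) : Prop :=
  (issues.all (fun issue =>
    PySem.Dict.contains (PySem.Dict.mk issue) "severity" &&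
      (!(PySem.Dict.getD (PySem.Dict.mk issue) "severity" "" == "critical") ||
        PySem.Dict.contains (PySem.Dict.mk issue) "type"))) = true
instance (issues : List (List (String × String))) : Decidable (Pre_assess_correctability_py issues) := by
  unfold Pre_assess_correctability_py; infer_instance

def pvWitness_assess_correctability_py : (List (List (String × String))) :=
  [[("severity", "critical"), ("type", "excessive_length")], [("severity", "minor")]]

def Spec_assess_correctability_py (issues : List (List (String × String))) (out : Bool) : Prop := out = assess_correctability_py_alt issues
instance (issues : List (List (String × String))) (out : Bool) : Decidable (Spec_assess_correctability_py issues out) := by unfold Spec_assess_correctability_py; infer_instance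

-- ===== CLAIM (what is proved, stated in full; the proofs are below) =====
def Claim_equal_assess_correctability_py : Prop := ∀ (issues : List (List (String × String))), Dom_assess_correctability_py issues → Pre_assess_correctability_py issues → Spec_assess_correctability_py issues (assess_correctability_py issues)

-- ===== LEMMAS AND PROOFS =====

-- The disqualifying predicate: a critical topic_hallucination.
def pvBad (issue : List (String × String)) : Bool :=
  PySem.Dict.getD (PySem.Dict.mk issue) "severity" "" == "critical" &&
  PySem.Dict.getD (PySem.Dict.mk issue) "type" "" == "topic_hallucination"

-- B is the negated existence of a disqualifying issue.
theorem alt_eq_not_any (issues : List (List (String × String))) :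
    assess_correctability_py_alt issues = !(issues.any pvBad) := by
  induction issues with
  | nil => rfl
  | cons issue rest ih =>
    have hdef : assess_correctability_py_alt (issue :: rest)
        = if pvBad issue then false else assess_correctability_py_alt rest := rfl
    rw [hdef, List.any_cons]
    by_cases h : pvBad issue <;> simp [h, ih]

-- A too: if a critical topic_hallucination exists, A's all(...) clause is false
-- (the technical list does not contain "topic_hallucination"), so A is false;
-- otherwise the any(...) clause is false and A is true.
theorem a_eq_not_any (issues : List (List (String × String))) :
    assess_correctability_py issues = !(issues.any pvBad) := by
  unfold assess_correctability_py
  by_cases hX : issues.any pvBad = true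
  · rw [hX]
    simp only [List.any_eq_true] at hX
    obtain ⟨i, hi, hbad⟩ := hX
    simp only [pvBad, Bool.and_eq_true, beq_iff_eq] at hbad
    have hany : (issues.filter (fun issue =>
        PySem.Dict.getD (PySem.Dict.mk issue) "severity" "" == "critical")).any
        (fun issue => PySem.Dict.getD (PySem.Dict.mk issue) "type" "" == "topic_hallucination")
        = true := by
      rw [List.any_eq_true]
      exact ⟨i, List.mem_filter.mpr ⟨hi, by simp [hbad.1]⟩, by simp [hbad.2]⟩
    simp [hany]
    exact ⟨i, hi, hbad.1, by simp [hbad.2], by simp [hbad.2], by simp [hbad.2]⟩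
  · simp only [Bool.not_eq_true] at hX
    rw [hX]
    have hany : (issues.filter (fun issue =>
        PySem.Dict.getD (PySem.Dict.mk issue) "severity" "" == "critical")).any
        (fun issue => PySem.Dict.getD (PySem.Dict.mk issue) "type" "" == "topic_hallucination")
        = false := by
      by_contra hc
      rw [Bool.not_eq_false, List.any_eq_true] at hc
      obtain ⟨i, hi, ht⟩ := hc
      have hmem := List.mem_filter.mp hi
      have hbad : pvBad i = true := by
        simp only [pvBad, Bool.and_eq_true]
        exact ⟨hmem.2, ht⟩
      rw [List.any_eq_false] at hX
      exact hX i hmem.1 hbad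
    simp [hany]

-- ===== VERDICT (by name: the statement is the Claim_ definition above) =====
theorem assess_correctability_py_spec : Claim_equal_assess_correctability_py := by
  intro issues _ _
  unfold Spec_assess_correctability_py
  rw [a_eq_not_any, alt_eq_not_any]
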